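-- pv_equiv track=rewrite | github.com/jmassengille/deterministic-extraction | src/backend/core/pipeline.py | _get_section_for_page
-- ===== SOURCE A (Python) =====
-- from typing import Any, Callable, Dict, List, Optional
--
-- def _get_section_for_page(
--
--     page_num: int,
--     page_sections: Dict[int, str]
-- ) -> Optional[str]:
--     """Find closest preceding section title from TOC.
--
--     Args:
--         page_num: Current page number
--         page_sections: Dictionary mapping page numbers to section titles
--
--     Returns:
--         Section title from nearest preceding page, or None if not found
--     """
--     if not page_sections:
--         return None
--     matching_pages = [p for p in page_sections.keys() if p <= page_num]
--     if matching_pages: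
--         return page_sections[max(matching_pages)]
--     return None
-- ===== SOURCE B (Python) =====
-- from typing import Dict, Optional
--
-- def _get_section_for_page(
--     page_num: int,
--     page_sections: Dict[int, str]
-- ) -> Optional[str]:
--     """Sort-then-scan: walk the entries in descending page order and return
--     the title of the first page that does not exceed page_num."""
--     for p, title in sorted(page_sections.items(), key=lambda kv: kv[0], reverse=True):
--         if p <= page_num:
--             return title
--     return None
-- ===== Notes on version B (the rewrite author's own statement) =====
-- stated objective: alternative
-- what changed: Replaces A's filter-the-qualifying-keys + max() + dict lookup with a sort-then-scan: the items are sorted by page descending and the scan returns the title of the first entry whose page does not exceed page_num (keys are unique, so the first qualifying entry in descending order is exactly the max qualifying key).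
import Mathlib
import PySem

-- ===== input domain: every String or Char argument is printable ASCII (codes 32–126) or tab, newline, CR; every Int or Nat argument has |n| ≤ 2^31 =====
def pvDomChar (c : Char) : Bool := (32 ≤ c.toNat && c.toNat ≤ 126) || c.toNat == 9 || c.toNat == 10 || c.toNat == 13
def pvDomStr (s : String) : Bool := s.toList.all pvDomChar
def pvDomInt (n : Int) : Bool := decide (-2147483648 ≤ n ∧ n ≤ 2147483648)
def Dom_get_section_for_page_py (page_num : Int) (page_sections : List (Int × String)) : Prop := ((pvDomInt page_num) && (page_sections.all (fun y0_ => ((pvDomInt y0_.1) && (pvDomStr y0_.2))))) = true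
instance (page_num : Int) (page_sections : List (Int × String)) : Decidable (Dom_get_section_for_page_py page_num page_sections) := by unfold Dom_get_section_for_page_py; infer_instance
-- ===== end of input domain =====

-- B replaces A's filter-qualifying-keys + max() + dict-lookup with a sort-then-scan:
-- sort items by page descending, return the title of the first entry whose page ≤ page_num
-- (dict keys are unique, so that entry carries the max qualifying key). Objective: alternative.

-- ===== PORT A =====
def get_section_for_page_py (page_num : Int) (page_sections : List (Int × String)) : Option String :=
  let d := PySem.Dict.ofList page_sections
  if d.items = [] then none           -- if not page_sections: return None
  else
    let matching := d.keys.filter (fun p => decide (p ≤ page_num))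
    match PySem.List.max? matching (fun x => x) with   -- max(matching_pages) on the nonempty branch
    | some m => d.get? m                               -- return page_sections[...]
    | none => none

-- ===== PORT B =====
def get_section_for_page_py_alt (page_num : Int) (page_sections : List (Int × String)) : Option String :=
  let d := PySem.Dict.ofList page_sections
  -- for p, title in sorted(d.items(), key=lambda kv: kv[0], reverse=True): if p <= page_num: return title
  ((PySem.List.sorted d.items (fun kv => kv.1) true).find?
      (fun kv => decide (kv.1 ≤ page_num))).map Prod.snd

-- ===== PRECONDITION & SPEC =====
def Spec_get_section_for_page_py (page_num : Int) (page_sections : List (Int × String)) (out : Option String) : Prop := out = get_section_for_page_py_alt page_num page_sections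
instance (page_num : Int) (page_sections : List (Int × String)) (out : Option String) : Decidable (Spec_get_section_for_page_py page_num page_sections out) := by unfold Spec_get_section_for_page_py; infer_instance

-- ===== CLAIM (what is proved, stated in full; the proofs are below) =====
def Claim_equal_get_section_for_page_py : Prop := ∀ (page_num : Int) (page_sections : List (Int × String)), Dom_get_section_for_page_py page_num page_sections → Spec_get_section_for_page_py page_num page_sections (get_section_for_page_py page_num page_sections)

-- ===== LEMMAS AND PROOFS =====

-- In a strictly key-descending list, the first entry whose key qualifies (≤ n) is the one
-- carrying the maximum qualifying key m.
lemma pvFind_desc (n m : Int) (s : List (Int × String))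
    (hs : s.Pairwise (fun a b => b.1 < a.1))
    (hm : m ∈ s.map Prod.fst) (hmn : m ≤ n)
    (hmax : ∀ k ∈ s.map Prod.fst, k ≤ n → k ≤ m) :
    ∃ t, s.find? (fun kv => decide (kv.1 ≤ n)) = some (m, t) ∧ (m, t) ∈ s := by
  induction s with
  | nil => simp at hm
  | cons hd tl ih =>
    rcases List.pairwise_cons.mp hs with ⟨hhd, htl⟩
    by_cases h : hd.1 ≤ n
    · -- head qualifies; its key must be m
      have hkm : hd.1 ≤ m := hmax hd.1 (by simp) h
      have hmeq : m = hd.1 := by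
        rcases List.mem_map.mp hm with ⟨pt, hpt, hpt1⟩
        rcases List.mem_cons.mp hpt with rfl | hpt'
        · omega
        · have := hhd pt hpt'
          omega
      refine ⟨hd.2, ?_, ?_⟩
      · rw [List.find?_cons_of_pos (by simpa using h)]
        simp [hmeq]
      · simp [hmeq]
    · -- head does not qualify; m is in the tail
      have hmtl : m ∈ tl.map Prod.fst := by
        rcases List.mem_map.mp hm with ⟨pt, hpt, hpt1⟩
        rcases List.mem_cons.mp hpt with rfl | hpt'
        · omega
        · exact List.mem_map.mpr ⟨pt, hpt', hpt1⟩
      obtain ⟨t, hf, hmem⟩ := ih htl hmtl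
        (fun k hk hkn => hmax k (by simpa using Or.inr hk) hkn)
      exact ⟨t, by rw [List.find?_cons_of_neg (by simpa using h)]; exact hf,
        List.mem_cons_of_mem _ hmem⟩

-- ===== VERDICT (by name: the statement is the Claim_ definition above) =====
theorem get_section_for_page_py_spec : Claim_equal_get_section_for_page_py := by
  intro n ps _
  unfold Spec_get_section_for_page_py get_section_for_page_py get_section_for_page_py_alt
  dsimp only
  set d := PySem.Dict.ofList ps with hd
  set s := PySem.List.sorted d.items (fun kv => kv.1) true with hsdef
  have hnd : d.keys.Nodup := PySem.Dict.nodup_keys_ofList ps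
  have hperm : s.Perm d.items := PySem.List.sorted_perm ..
  have hpermk : (s.map Prod.fst).Perm d.keys := hperm.map Prod.fst
  have hndk : (s.map Prod.fst).Nodup := hpermk.nodup_iff.mpr hnd
  have hdesc : s.Pairwise (fun a b => b.1 < a.1) := by
    have h1 : s.Pairwise (fun a b => b.1 ≤ a.1) := PySem.List.sorted_pairwise_rev ..
    have h2 : s.Pairwise (fun a b => a.1 ≠ b.1) := List.pairwise_map.mp hndk
    exact (h1.and h2).imp (fun h => by omega)
  rcases hmx : PySem.List.max? (d.keys.filter (fun p => decide (p ≤ n))) (fun x => x)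
    with _ | m
  · -- no qualifying key: both sides are none
    have hempty : d.keys.filter (fun p => decide (p ≤ n)) = [] :=
      (PySem.List.max?_eq_none_iff _ _).mp hmx
    have hnone : s.find? (fun kv => decide (kv.1 ≤ n)) = none := by
      rw [List.find?_eq_none]
      intro kv hkv hle
      have hk : kv.1 ∈ d.keys := hpermk.mem_iff.mp (List.mem_map_of_mem hkv)
      have : kv.1 ∈ d.keys.filter (fun p => decide (p ≤ n)) :=
        List.mem_filter.mpr ⟨hk, hle⟩
      simp [hempty] at this
    rw [hnone]
    split <;> simp
  · -- qualifying keys exist, m is the max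
    have hmem := PySem.List.max?_mem hmx
    have hmk : m ∈ d.keys := (List.mem_filter.mp hmem).1
    have hmn : m ≤ n := by simpa using (List.mem_filter.mp hmem).2
    have hmax : ∀ k ∈ s.map Prod.fst, k ≤ n → k ≤ m := by
      intro k hk hkn
      exact PySem.List.max?_isMax hmx k
        (List.mem_filter.mpr ⟨hpermk.mem_iff.mp hk, by simpa using hkn⟩)
    obtain ⟨t, hf, hmemt⟩ := pvFind_desc n m s hdesc (hpermk.mem_iff.mpr hmk) hmn hmax
    have hget : d.get? m = some t :=
      PySem.Dict.get?_of_mem_items d (hperm.mem_iff.mp hmemt) hnd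
    have hne : d.items ≠ [] := by
      intro habs
      have : d.keys = [] := by simp [PySem.Dict.keys, habs]
      simp [this] at hmk
    rw [if_neg hne]
    simp only [hget, hf, Option.map_some]
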